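-- pv_equiv track=rewrite | github.com/gaurav-hsv/biz-agent | app/agents/field_validator_v1.py | _parse_branch
-- ===== SOURCE A (Python) =====
-- from typing import Dict, Any, List, Optional, Tuple
--
-- def _parse_branch(expr: str) -> List[List[str]]:
--     expr = expr.strip()
--     if "|" in expr:
--         alts = [a.strip() for a in expr.split("|")]
--         out: List[List[str]] = []
--         for a in alts:
--             a = a.strip()
--             if a.startswith("(") and a.endswith(")"):
--                 out.append([x.strip() for x in a[1:-1].split(",") if x.strip()])
--             elif "," in a:  # split comma branch without parens
--                 out.append([x.strip() for x in a.split(",") if x.strip()])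
--             else:
--                 out.append([a])
--         return out
--     # single branch (no '|')
--     if expr.startswith("(") and expr.endswith(")"):
--         return [[x.strip() for x in expr[1:-1].split(",") if x.strip()]]
--     if "," in expr:
--         return [[x.strip() for x in expr.split(",") if x.strip()]]
--     return [[expr]]
-- ===== SOURCE B (Python) =====
-- from typing import List
--
-- def _parse_branch(expr: str) -> List[List[str]]:
--     # single left-to-right scan over the characters with an explicit accumulator:
--     # '|' closes an alternative, ',' closes a token; paren trimming is done on the
--     # first/last token of the finished alternative instead of re-splitting substrings.
--     out: List[List[str]] = []
--     toks: List[str] = []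
--     cur = ""
--     for ch in expr.strip() + "|":
--         if ch == "|":
--             toks.append(cur.strip())
--             cur = ""
--             if len(toks) == 1:
--                 t = toks[0]
--                 if t.startswith("(") and t.endswith(")"):
--                     u = t[1:-1].strip()
--                     out.append([u] if u else [])
--                 else:
--                     out.append([t])
--             else:
--                 if toks[0].startswith("(") and toks[-1].endswith(")"):
--                     toks[0] = toks[0][1:].strip()
--                     toks[-1] = toks[-1][:-1].strip()
--                 out.append([t for t in toks if t])
--             toks = []
--         elif ch == ",":
--             toks.append(cur.strip())
--             cur = ""
--         else:
--             cur += ch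
--     return out
-- ===== Notes on version B (the rewrite author's own statement) =====
-- stated objective: alternative
-- what changed: Replaces A's staged pipeline (split the expression on the pipe separator, then for each alternative re-split substrings on commas with strip/filter comprehensions) by a single left-to-right character scan with an explicit accumulator: a pipe flushes an alternative, a comma flushes a token, and the paren case is handled by trimming the first and last accumulated token instead of slicing and re-splitting the interior.
import Mathlib
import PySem

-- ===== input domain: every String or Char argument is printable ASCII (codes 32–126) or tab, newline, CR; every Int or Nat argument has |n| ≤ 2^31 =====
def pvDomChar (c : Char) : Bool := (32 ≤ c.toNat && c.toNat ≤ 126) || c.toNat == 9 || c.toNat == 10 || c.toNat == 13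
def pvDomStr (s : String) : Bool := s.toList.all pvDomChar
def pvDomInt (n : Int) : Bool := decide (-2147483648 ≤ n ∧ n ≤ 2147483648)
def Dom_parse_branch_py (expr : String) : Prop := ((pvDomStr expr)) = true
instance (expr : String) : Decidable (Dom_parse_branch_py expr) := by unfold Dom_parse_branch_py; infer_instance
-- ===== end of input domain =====

-- B replaces A's staged split/strip passes by a single left-to-right character scan with an
-- explicit accumulator ('|' flushes an alternative, ',' flushes a token, parens trimmed on the
-- finished first/last token); objective: alternative, same cost.

-- ===== PORT A =====
-- literal port of A: strip, then the pipe branch with its loop, else the duplicated single-branch code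
def parse_branch_py (expr : String) : List (List String) :=
  let e := PySem.Chars.strip expr.toList
  if PySem.Chars.isIn ['|'] e then
    let alts := (PySem.Chars.splitOn e ['|']).map PySem.Chars.strip
    alts.foldl (fun out a =>
      let a := PySem.Chars.strip a
      if PySem.Chars.startswith a ['('] && PySem.Chars.endswith a [')'] then
        out ++ [(((PySem.Chars.splitOn (PySem.List.slice a (some 1) (some (-1))) [',']).map
            PySem.Chars.strip).filter (fun x => !x.isEmpty)).map String.ofList]
      else if PySem.Chars.isIn [','] a then
        out ++ [(((PySem.Chars.splitOn a [',']).map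
            PySem.Chars.strip).filter (fun x => !x.isEmpty)).map String.ofList]
      else
        out ++ [[String.ofList a]]) []
  else
    if PySem.Chars.startswith e ['('] && PySem.Chars.endswith e [')'] then
      [(((PySem.Chars.splitOn (PySem.List.slice e (some 1) (some (-1))) [',']).map
          PySem.Chars.strip).filter (fun x => !x.isEmpty)).map String.ofList]
    else if PySem.Chars.isIn [','] e then
      [(((PySem.Chars.splitOn e [',']).map
          PySem.Chars.strip).filter (fun x => !x.isEmpty)).map String.ofList]
    else
      [[String.ofList e]]

-- ===== PORT B =====
-- port of Source B's '|' branch: finish the current alternative from its accumulated stripped tokens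
def finishAltB (toks : List (List Char)) : List String :=
  match toks with
  | [] => []   -- unreachable: a token is always flushed before an alternative ends
  | [t] =>
    if PySem.Chars.startswith t ['('] && PySem.Chars.endswith t [')'] then
      let u := PySem.Chars.strip (PySem.List.slice t (some 1) (some (-1)))
      if u.isEmpty then [] else [String.ofList u]
    else [String.ofList t]
  | t0 :: t1 :: rest =>
    let tl := t1 :: rest
    let toks2 :=
      if PySem.Chars.startswith t0 ['('] && PySem.Chars.endswith (tl.getLast (by simp)) [')'] then
        PySem.Chars.strip (t0.drop 1) :: tl.dropLast ++
          [PySem.Chars.strip ((tl.getLast (by simp)).dropLast)]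
      else t0 :: tl
    (toks2.filter (fun t => !t.isEmpty)).map String.ofList

-- port of Source B's scanner step: the body of the for-loop over the characters
def stepB (st : List (List String) × List (List Char) × List Char) (ch : Char) :
    List (List String) × List (List Char) × List Char :=
  if ch = '|' then (st.1 ++ [finishAltB (st.2.1 ++ [PySem.Chars.strip st.2.2])], [], [])
  else if ch = ',' then (st.1, st.2.1 ++ [PySem.Chars.strip st.2.2], [])
  else (st.1, st.2.1, st.2.2 ++ [ch])

def parse_branch_py_alt (expr : String) : List (List String) :=
  ((PySem.Chars.strip expr.toList ++ ['|']).foldl stepB ([], [], [])).1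

-- ===== PRECONDITION & SPEC =====
def Spec_parse_branch_py (expr : String) (out : List (List String)) : Prop := out = parse_branch_py_alt expr
instance (expr : String) (out : List (List String)) : Decidable (Spec_parse_branch_py expr out) := by unfold Spec_parse_branch_py; infer_instance

-- ===== CLAIM (what is proved, stated in full; the proofs are below) =====
def Claim_equal_parse_branch_py : Prop := ∀ (expr : String), Dom_parse_branch_py expr → Spec_parse_branch_py expr (parse_branch_py expr)

-- ===== LEMMAS AND PROOFS =====

-- simple structural split on a single separator character (proof-side normal form)
def splitC (c : Char) : List Char → List (List Char)
  | [] => [[]]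
  | x :: xs =>
    if x = c then [] :: splitC c xs
    else
      match splitC c xs with
      | [] => [[x]]
      | h :: t => (x :: h) :: t

def consHead (u : List Char) : List (List Char) → List (List Char)
  | [] => [u]
  | h :: t => (u ++ h) :: t

def snocLast (v : List Char) : List (List Char) → List (List Char)
  | [] => [v]
  | [h] => [h ++ v]
  | h :: t => h :: snocLast v t

theorem splitC_ne_nil (c : Char) (l : List Char) : splitC c l ≠ [] := by
  cases l with
  | nil => simp [splitC]
  | cons x xs =>
    by_cases h : x = c
    · simp [splitC, h]
    · simp only [splitC, if_neg h]
      cases splitC c xs <;> simp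

theorem splitC_cons_sep (c : Char) (l : List Char) : splitC c (c :: l) = [] :: splitC c l := by
  simp [splitC]

theorem splitC_cons_ne (c x : Char) (l : List Char) (h : x ≠ c) :
    splitC c (x :: l) = consHead [x] (splitC c l) := by
  simp only [splitC, if_neg h]
  cases hs : splitC c l with
  | nil => exact absurd hs (splitC_ne_nil c l)
  | cons a t => simp [consHead]

theorem consHead_consHead (u v : List Char) (L : List (List Char)) :
    consHead u (consHead v L) = consHead (u ++ v) L := by
  cases L <;> simp [consHead]

theorem splitC_nosep (c : Char) (l : List Char) (h : c ∉ l) : splitC c l = [l] := by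
  induction l with
  | nil => simp [splitC]
  | cons x xs ih =>
    have hx : x ≠ c := by rintro rfl; exact h (List.mem_cons_self)
    rw [splitC_cons_ne c x xs hx, ih (fun hm => h (List.mem_cons_of_mem _ hm))]
    simp [consHead]

theorem splitC_mem (c : Char) (l : List Char) (h : c ∈ l) :
    ∃ t0 t1 rest, splitC c l = t0 :: t1 :: rest := by
  induction l with
  | nil => simp at h
  | cons x xs ih =>
    by_cases hx : x = c
    · subst hx
      rw [splitC_cons_sep]
      obtain ⟨h0, t⟩ : ∃ h0 t, splitC x xs = h0 :: t := by
        cases hs : splitC x xs with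
        | nil => exact absurd hs (splitC_ne_nil x xs)
        | cons a t => exact ⟨a, t, rfl⟩
      obtain ⟨t, ht⟩ := t
      exact ⟨[], h0, t, by rw [ht]⟩
    · have hm : c ∈ xs := by
        rcases List.mem_cons.mp h with h1 | h1
        · exact absurd h1.symm hx
        · exact h1
      obtain ⟨t0, t1, rest, hs⟩ := ih hm
      rw [splitC_cons_ne c x xs hx, hs]
      exact ⟨x :: t0, t1, rest, rfl⟩

theorem splitC_append_sep (c : Char) (x : List Char) :
    splitC c (x ++ [c]) = splitC c x ++ [[]] := by
  induction x with
  | nil => simp [splitC]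
  | cons d x ih =>
    by_cases hd : d = c
    · subst hd; rw [List.cons_append, splitC_cons_sep, splitC_cons_sep, ih]; rfl
    · rw [List.cons_append, splitC_cons_ne c d _ hd, splitC_cons_ne c d _ hd, ih]
      cases hs : splitC c x with
      | nil => exact absurd hs (splitC_ne_nil c x)
      | cons a t => simp [consHead]

theorem splitC_append_left (c : Char) (u x : List Char) (h : c ∉ u) :
    splitC c (u ++ x) = consHead u (splitC c x) := by
  induction u with
  | nil =>
    simp only [List.nil_append]
    cases hs : splitC c x with
    | nil => exact absurd hs (splitC_ne_nil c x)
    | cons a t => simp [consHead]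
  | cons d u ih =>
    have hd : d ≠ c := by rintro rfl; exact h List.mem_cons_self
    rw [List.cons_append, splitC_cons_ne c d _ hd,
      ih (fun hm => h (List.mem_cons_of_mem _ hm)), consHead_consHead]
    rfl

theorem snocLast_cons (v : List Char) (h : List Char) (t : List (List Char)) (ht : t ≠ []) :
    snocLast v (h :: t) = h :: snocLast v t := by
  cases t with
  | nil => exact absurd rfl ht
  | cons a t => rfl

theorem splitC_append_right (c : Char) (x v : List Char) (h : c ∉ v) :
    splitC c (x ++ v) = snocLast v (splitC c x) := by
  induction x with
  | nil => simp [splitC, splitC_nosep c v h, snocLast]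
  | cons d x ih =>
    by_cases hd : d = c
    · subst hd
      rw [List.cons_append, splitC_cons_sep, splitC_cons_sep, ih,
        snocLast_cons _ _ _ (splitC_ne_nil _ _)]
    · rw [List.cons_append, splitC_cons_ne c d _ hd, splitC_cons_ne c d _ hd, ih]
      cases hs : splitC c x with
      | nil => exact absurd hs (splitC_ne_nil c x)
      | cons a t =>
        cases t with
        | nil => simp [snocLast, consHead]
        | cons b t => simp [snocLast, consHead, snocLast_cons]

theorem snocLast_append_last (v z : List Char) (M : List (List Char)) :
    snocLast v (M ++ [z]) = M ++ [z ++ v] := by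
  induction M with
  | nil => rfl
  | cons a M ih => rw [List.cons_append, snocLast_cons _ _ _ (by simp), ih]; rfl

-- PySem.Chars.splitOn with a single-character separator computes splitC
theorem splitOn_go_eq (c : Char) : ∀ (fuel : Nat) (l cur : List Char) (acc : List (List Char)),
    l.length < fuel →
    PySem.Chars.splitOn.go [c] fuel l cur acc = acc.reverse ++ consHead cur.reverse (splitC c l) := by
  intro fuel
  induction fuel with
  | zero => intro l cur acc h; exact absurd h (Nat.not_lt_zero _)
  | succ fuel ih =>
    intro l cur acc h
    cases l with
    | nil => simp [PySem.Chars.splitOn.go, splitC, consHead]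
    | cons x rest =>
      by_cases hx : c = x
      · subst hx
        have hpre : [c].isPrefixOf (c :: rest) = true := by simp [List.isPrefixOf]
        rw [PySem.Chars.splitOn.go]
        simp only [hpre, if_true]
        rw [ih _ _ _ (by simpa using Nat.lt_of_succ_lt_succ h)]
        rw [splitC_cons_sep]
        cases hs : splitC c rest with
        | nil => exact absurd hs (splitC_ne_nil c rest)
        | cons a t => simp only [List.length_cons, List.drop_succ_cons, List.drop_zero]; simp [consHead]; rw [hs]
      · have hpre : [c].isPrefixOf (x :: rest) = false := by
          simp [List.isPrefixOf]
          exact hx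
        rw [PySem.Chars.splitOn.go]
        simp only [hpre, Bool.false_eq_true, if_false]
        rw [ih _ _ _ (by simpa using Nat.lt_of_succ_lt_succ h)]
        rw [splitC_cons_ne c x rest (fun he => hx he.symm), consHead_consHead]
        simp

theorem splitOn_eq_splitC (c : Char) (l : List Char) :
    PySem.Chars.splitOn l [c] = splitC c l := by
  unfold PySem.Chars.splitOn
  rw [splitOn_go_eq c (l.length + 1) l [] [] (by omega)]
  cases hs : splitC c l with
  | nil => exact absurd hs (splitC_ne_nil c l)
  | cons a t => simp [consHead]

-- ---- strip toolkit ----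

theorem dropWhile_idem {α : Type} (p : α → Bool) (l : List α) :
    List.dropWhile p (List.dropWhile p l) = List.dropWhile p l := by
  induction l with
  | nil => simp
  | cons a l ih =>
    by_cases h : p a
    · simp [h, ih]
    · simp [h]

theorem rstrip_prefix (s : List Char) : PySem.Chars.rstrip s <+: s := by
  have h : List.dropWhile PySem.Chars.isspace s.reverse <:+ s.reverse :=
    List.dropWhile_suffix _
  have := List.reverse_prefix.mpr h
  simpa [PySem.Chars.rstrip] using this

theorem rstrip_idem (s : List Char) :
    PySem.Chars.rstrip (PySem.Chars.rstrip s) = PySem.Chars.rstrip s := by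
  simp [PySem.Chars.rstrip, dropWhile_idem]

theorem rstrip_cons_nonspace (x : Char) (l : List Char) (h : PySem.Chars.isspace x = false) :
    PySem.Chars.rstrip (x :: l) = x :: PySem.Chars.rstrip l := by
  unfold PySem.Chars.rstrip
  rw [List.reverse_cons, List.dropWhile_append]
  by_cases he : (List.dropWhile PySem.Chars.isspace l.reverse).isEmpty
  · simp [he, List.dropWhile, h]
    simpa using congrArg List.reverse (List.isEmpty_iff.mp he)
  · simp [he]

theorem lstrip_cons_nonspace (x : Char) (l : List Char) (h : PySem.Chars.isspace x = false) :
    PySem.Chars.lstrip (x :: l) = x :: l := by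
  simp [PySem.Chars.lstrip, List.dropWhile, h]

theorem strip_cons_nonspace (x : Char) (l : List Char) (h : PySem.Chars.isspace x = false) :
    PySem.Chars.strip (x :: l) = x :: PySem.Chars.rstrip l := by
  unfold PySem.Chars.strip
  rw [lstrip_cons_nonspace x l h, rstrip_cons_nonspace x l h]

theorem rstrip_append_singleton_nonspace (y : List Char) (x : Char)
    (h : PySem.Chars.isspace x = false) :
    PySem.Chars.rstrip (y ++ [x]) = y ++ [x] := by
  unfold PySem.Chars.rstrip
  rw [List.reverse_append]
  simp [List.dropWhile, h]

theorem lstrip_append_singleton (y : List Char) (x : Char) (h : PySem.Chars.isspace x = false) :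
    PySem.Chars.lstrip (y ++ [x]) = PySem.Chars.lstrip y ++ [x] := by
  unfold PySem.Chars.lstrip
  rw [List.dropWhile_append]
  by_cases he : (List.dropWhile PySem.Chars.isspace y).isEmpty
  · simp [List.dropWhile, h, List.isEmpty_iff.mp he]
  · simp [he]

theorem strip_append_singleton_nonspace (y : List Char) (x : Char)
    (h : PySem.Chars.isspace x = false) :
    PySem.Chars.strip (y ++ [x]) = PySem.Chars.lstrip y ++ [x] := by
  unfold PySem.Chars.strip
  rw [lstrip_append_singleton y x h, rstrip_append_singleton_nonspace _ x h]

theorem rstrip_append_ws (y v : List Char) (h : ∀ c ∈ v, PySem.Chars.isspace c = true) :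
    PySem.Chars.rstrip (y ++ v) = PySem.Chars.rstrip y := by
  unfold PySem.Chars.rstrip
  rw [List.reverse_append, List.dropWhile_append]
  have hv : List.dropWhile PySem.Chars.isspace v.reverse = [] := by
    rw [List.dropWhile_eq_nil_iff]
    intro c hc; exact h c (List.mem_reverse.mp hc)
  simp [hv]

theorem lstrip_append_ws (u x : List Char) (h : ∀ c ∈ u, PySem.Chars.isspace c = true) :
    PySem.Chars.lstrip (u ++ x) = PySem.Chars.lstrip x := by
  unfold PySem.Chars.lstrip
  rw [List.dropWhile_append]
  have hu : List.dropWhile PySem.Chars.isspace u = [] := by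
    rw [List.dropWhile_eq_nil_iff]; exact h
  simp [hu]

theorem strip_append_left_ws (u x : List Char) (h : ∀ c ∈ u, PySem.Chars.isspace c = true) :
    PySem.Chars.strip (u ++ x) = PySem.Chars.strip x := by
  unfold PySem.Chars.strip
  rw [lstrip_append_ws u x h]

theorem strip_append_right_ws (x v : List Char) (h : ∀ c ∈ v, PySem.Chars.isspace c = true) :
    PySem.Chars.strip (x ++ v) = PySem.Chars.strip x := by
  unfold PySem.Chars.strip PySem.Chars.lstrip
  rw [List.dropWhile_append]
  by_cases he : (List.dropWhile PySem.Chars.isspace x).isEmpty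
  · have hv : List.dropWhile PySem.Chars.isspace v = [] := by
      rw [List.dropWhile_eq_nil_iff]; exact h
    simp [hv, List.isEmpty_iff.mp he, PySem.Chars.rstrip]
  · simp only [he, Bool.false_eq_true, if_false]
    exact rstrip_append_ws _ v h

theorem lstrip_decomp (l : List Char) :
    l = l.takeWhile PySem.Chars.isspace ++ PySem.Chars.lstrip l := by
  simp [PySem.Chars.lstrip]

theorem rstrip_decomp (l : List Char) :
    ∃ v, l = PySem.Chars.rstrip l ++ v ∧ ∀ c ∈ v, PySem.Chars.isspace c = true := by
  refine ⟨(l.reverse.takeWhile PySem.Chars.isspace).reverse, ?_, ?_⟩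
  · unfold PySem.Chars.rstrip
    conv_lhs => rw [← l.reverse_reverse,
      ← List.takeWhile_append_dropWhile (p := PySem.Chars.isspace) (l := l.reverse)]
    rw [List.reverse_append]
  · intro c hc
    exact List.mem_takeWhile_imp (List.mem_reverse.mp hc)

theorem strip_decomp (l : List Char) :
    ∃ u v, l = u ++ PySem.Chars.strip l ++ v ∧ (∀ c ∈ u, PySem.Chars.isspace c = true) ∧
      (∀ c ∈ v, PySem.Chars.isspace c = true) := by
  obtain ⟨v, hv, hvw⟩ := rstrip_decomp (PySem.Chars.lstrip l)
  refine ⟨l.takeWhile PySem.Chars.isspace, v, ?_, ?_, hvw⟩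
  · have h2 : PySem.Chars.strip l ++ v = PySem.Chars.lstrip l := by
      unfold PySem.Chars.strip; rw [← hv]
    conv_lhs => rw [lstrip_decomp l]
    rw [List.append_assoc, h2]
  · intro c hc; exact List.mem_takeWhile_imp hc

theorem lstrip_fix_head (c : Char) (t : List Char)
    (h : PySem.Chars.lstrip (c :: t) = c :: t) : PySem.Chars.isspace c = false := by
  by_cases hp : PySem.Chars.isspace c
  · exfalso
    have h1 : PySem.Chars.lstrip (c :: t) = List.dropWhile PySem.Chars.isspace t := by
      simp [PySem.Chars.lstrip, List.dropWhile, hp]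
    have h2 := congrArg List.length (h1 ▸ h)
    have h3 := List.length_dropWhile_le (p := PySem.Chars.isspace) (l := t)
    simp at h2
    omega
  · simpa using hp

theorem lstrip_rstrip_of_lstripped (y : List Char) (h : PySem.Chars.lstrip y = y) :
    PySem.Chars.lstrip (PySem.Chars.rstrip y) = PySem.Chars.rstrip y := by
  cases y with
  | nil => simp [PySem.Chars.rstrip, PySem.Chars.lstrip]
  | cons c t =>
    have hc := lstrip_fix_head c t h
    rw [rstrip_cons_nonspace c t hc, lstrip_cons_nonspace _ _ hc]

theorem strip_idem (s : List Char) :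
    PySem.Chars.strip (PySem.Chars.strip s) = PySem.Chars.strip s := by
  unfold PySem.Chars.strip
  rw [lstrip_rstrip_of_lstripped (PySem.Chars.lstrip s)
    (by simp [PySem.Chars.lstrip, dropWhile_idem]), rstrip_idem]

theorem stripped_lstrip (b : List Char) (h : PySem.Chars.strip b = b) :
    PySem.Chars.lstrip b = b := by
  have hsuf : PySem.Chars.lstrip b <:+ b := List.dropWhile_suffix _
  have hlen1 : (PySem.Chars.lstrip b).length ≤ b.length := hsuf.length_le
  have hlen2 : b.length ≤ (PySem.Chars.lstrip b).length := by
    have := (rstrip_prefix (PySem.Chars.lstrip b)).length_le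
    unfold PySem.Chars.strip at h
    rw [h] at this
    exact this
  exact hsuf.eq_of_length (by omega)

theorem stripped_rstrip (b : List Char) (h : PySem.Chars.strip b = b) :
    PySem.Chars.rstrip b = b := by
  have hl := stripped_lstrip b h
  unfold PySem.Chars.strip at h
  rw [hl] at h
  exact h

theorem strip_rstrip (l : List Char) :
    PySem.Chars.strip (PySem.Chars.rstrip l) = PySem.Chars.strip l := by
  obtain ⟨v, hv, hvw⟩ := rstrip_decomp l
  conv_rhs => rw [hv]
  rw [strip_append_right_ws _ v hvw]

theorem strip_lstrip (l : List Char) :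
    PySem.Chars.strip (PySem.Chars.lstrip l) = PySem.Chars.strip l := by
  conv_rhs => rw [lstrip_decomp l]
  rw [strip_append_left_ws _ _ (fun c hc => List.mem_takeWhile_imp hc)]

-- ---- the per-alternative functions ----

-- A's comma-split-strip-filter comprehension (proof-side name for A's repeated expression)
def filterSplitA (x : List Char) : List String :=
  (((PySem.Chars.splitOn x [',']).map PySem.Chars.strip).filter (fun t => !t.isEmpty)).map
    String.ofList

-- A's per-alternative body, applied to the (already stripped) alternative
def fApy (a : List Char) : List String :=
  if PySem.Chars.startswith a ['('] && PySem.Chars.endswith a [')'] then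
    filterSplitA (PySem.List.slice a (some 1) (some (-1)))
  else if PySem.Chars.isIn [','] a then filterSplitA a
  else [String.ofList a]

-- tokens of an alternative, with a pending partial first token cur
def tokensC (cur : List Char) (a : List Char) : List (List Char) :=
  match splitC ',' a with
  | [] => [PySem.Chars.strip cur]
  | h :: t => PySem.Chars.strip (cur ++ h) :: t.map PySem.Chars.strip

theorem tokensC_nil (a : List Char) :
    tokensC [] a = (splitC ',' a).map PySem.Chars.strip := by
  unfold tokensC
  cases hs : splitC ',' a with
  | nil => exact absurd hs (splitC_ne_nil _ _)
  | cons h t => simp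

theorem tokensC_empty (cur : List Char) : tokensC cur [] = [PySem.Chars.strip cur] := by
  simp [tokensC, splitC]

theorem tokensC_cons_sep (cur a : List Char) :
    tokensC cur (',' :: a) = PySem.Chars.strip cur :: (splitC ',' a).map PySem.Chars.strip := by
  unfold tokensC
  rw [splitC_cons_sep]
  simp

theorem tokensC_cons_ne (cur : List Char) (x : Char) (a : List Char) (hx : x ≠ ',') :
    tokensC cur (x :: a) = tokensC (cur ++ [x]) a := by
  unfold tokensC
  rw [splitC_cons_ne ',' x a hx]
  cases hs : splitC ',' a with
  | nil => exact absurd hs (splitC_ne_nil _ _)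
  | cons h t => simp [consHead]

theorem map_strip_consHead_ws (u : List Char) (L : List (List Char))
    (hu : ∀ c ∈ u, PySem.Chars.isspace c = true) (hL : L ≠ []) :
    (consHead u L).map PySem.Chars.strip = L.map PySem.Chars.strip := by
  cases L with
  | nil => exact absurd rfl hL
  | cons h t => simp [consHead, strip_append_left_ws u h hu]

theorem map_strip_snocLast_ws (v : List Char) (L : List (List Char))
    (hv : ∀ c ∈ v, PySem.Chars.isspace c = true) (hL : L ≠ []) :
    (snocLast v L).map PySem.Chars.strip = L.map PySem.Chars.strip := by
  induction L with
  | nil => exact absurd rfl hL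
  | cons h t ih =>
    cases t with
    | nil => simp [snocLast, strip_append_right_ws h v hv]
    | cons h2 t2 =>
      rw [snocLast_cons _ _ _ (by simp)]
      simp only [List.map_cons]
      rw [ih (by simp)]
      simp

-- A's loop body appends, to out, exactly fApy of the stripped alternative
theorem bodyA_eq (out : List (List String)) (a : List Char) :
    (let a' := PySem.Chars.strip a
     if PySem.Chars.startswith a' ['('] && PySem.Chars.endswith a' [')'] then
       out ++ [(((PySem.Chars.splitOn (PySem.List.slice a' (some 1) (some (-1))) [',']).map
           PySem.Chars.strip).filter (fun x => !x.isEmpty)).map String.ofList]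
     else if PySem.Chars.isIn [','] a' then
       out ++ [(((PySem.Chars.splitOn a' [',']).map
           PySem.Chars.strip).filter (fun x => !x.isEmpty)).map String.ofList]
     else
       out ++ [[String.ofList a']]) = out ++ [fApy (PySem.Chars.strip a)] := by
  simp only [fApy, filterSplitA]
  split_ifs <;> rfl

-- ---- characterization of B's scanner ----

theorem scan_loop (cs : List Char) : ∀ (out : List (List String)) (toks : List (List Char))
    (cur : List Char),
    List.foldl stepB (out, toks, cur) (cs ++ ['|']) =
      (out ++ (finishAltB (toks ++ tokensC cur ((splitC '|' cs).headD [])) ::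
        ((splitC '|' cs).tail.map (fun a => finishAltB (tokensC [] a)))), [], []) := by
  induction cs with
  | nil =>
    intro out toks cur
    simp only [List.nil_append, List.foldl_cons, List.foldl_nil, stepB]
    simp [splitC, tokensC_empty]
  | cons x cs ih =>
    intro out toks cur
    by_cases hx : x = '|'
    · subst hx
      rw [List.cons_append, List.foldl_cons]
      have hstep : stepB (out, toks, cur) '|' =
          (out ++ [finishAltB (toks ++ [PySem.Chars.strip cur])], [], []) := by
        simp [stepB]
      rw [hstep, ih]
      rw [splitC_cons_sep]
      cases hs : splitC '|' cs with
      | nil => exact absurd hs (splitC_ne_nil _ _)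
      | cons a t => simp [tokensC_empty, tokensC_nil]
    · by_cases hx2 : x = ','
      · subst hx2
        rw [List.cons_append, List.foldl_cons]
        have hstep : stepB (out, toks, cur) ',' =
            (out, toks ++ [PySem.Chars.strip cur], []) := by
          simp [stepB]
        rw [hstep, ih]
        rw [splitC_cons_ne '|' ',' cs (by decide)]
        cases hs : splitC '|' cs with
        | nil => exact absurd hs (splitC_ne_nil _ _)
        | cons a t => simp [consHead, tokensC_cons_sep, tokensC_nil]
      · rw [List.cons_append, List.foldl_cons]
        have hstep : stepB (out, toks, cur) x = (out, toks, cur ++ [x]) := by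
          simp [stepB, hx, hx2]
        rw [hstep, ih]
        rw [splitC_cons_ne '|' x cs hx]
        cases hs : splitC '|' cs with
        | nil => exact absurd hs (splitC_ne_nil _ _)
        | cons a t => simp [consHead, tokensC_cons_ne _ _ _ hx2]

theorem B_eq_map (expr : String) :
    parse_branch_py_alt expr =
      (splitC '|' (PySem.Chars.strip expr.toList)).map
        (fun a => finishAltB ((splitC ',' a).map PySem.Chars.strip)) := by
  unfold parse_branch_py_alt
  rw [scan_loop]
  cases hs : splitC '|' (PySem.Chars.strip expr.toList) with
  | nil => exact absurd hs (splitC_ne_nil _ _)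
  | cons a t => simp [tokensC_nil]

theorem A_eq_map (expr : String) :
    parse_branch_py expr =
      (splitC '|' (PySem.Chars.strip expr.toList)).map
        (fun a => fApy (PySem.Chars.strip a)) := by
  unfold parse_branch_py
  by_cases h : PySem.Chars.isIn ['|'] (PySem.Chars.strip expr.toList) = true
  · simp only [h, if_true]
    simp only [bodyA_eq]
    rw [PySem.List.foldl_append_singleton_eq_map, List.map_map, splitOn_eq_splitC]
    exact List.map_congr_left fun a _ => by simp [Function.comp, strip_idem]
  · have hb : PySem.Chars.isIn ['|'] (PySem.Chars.strip expr.toList) = false := by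
      cases hx : PySem.Chars.isIn ['|'] (PySem.Chars.strip expr.toList)
      · rfl
      · exact absurd hx h
    have hmem : '|' ∉ PySem.Chars.strip expr.toList := by
      rw [PySem.Chars.isIn_eq_false_iff] at hb
      intro hm
      exact hb ((List.singleton_infix_iff _ _).mpr hm)
    simp only [hb, Bool.false_eq_true, if_false]
    rw [splitC_nosep '|' _ hmem, List.map_cons, List.map_nil, strip_idem]
    simp only [fApy, filterSplitA]
    split_ifs <;> rfl

-- tokens are insensitive to stripping the alternative
theorem tokens_strip (a : List Char) :
    (splitC ',' (PySem.Chars.strip a)).map PySem.Chars.strip =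
      (splitC ',' a).map PySem.Chars.strip := by
  obtain ⟨u, v, hd, hu, hv⟩ := strip_decomp a
  have hcu : ',' ∉ u := fun hm => absurd (hu ',' hm) (by decide)
  have hcv : ',' ∉ v := fun hm => absurd (hv ',' hm) (by decide)
  conv_rhs => rw [hd]
  rw [List.append_assoc, splitC_append_left ',' u _ hcu,
    map_strip_consHead_ws u _ hu (splitC_ne_nil _ _),
    splitC_append_right ',' _ v hcv,
    map_strip_snocLast_ws v _ hv (splitC_ne_nil _ _)]

theorem getLast_snoc {α : Type} (l : List α) (a : α) (h : l ++ [a] ≠ []) :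
    (l ++ [a]).getLast h = a := List.getLast_concat

-- finishAltB on an explicitly decomposed multi-token list
theorem finishAltB_multi (x z : List Char) (zs : List (List Char)) :
    finishAltB (x :: zs ++ [z]) =
      ((if PySem.Chars.startswith x ['('] && PySem.Chars.endswith z [')'] then
          PySem.Chars.strip (x.drop 1) :: zs ++ [PySem.Chars.strip z.dropLast]
        else x :: zs ++ [z]).filter (fun t => !t.isEmpty)).map String.ofList := by
  cases zs with
  | nil => simp [finishAltB]
  | cons w ws =>
    have hg : (w :: (ws ++ [z])).getLast (by simp) = z := getLast_snoc (w :: ws) z (by simp)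
    have hd : (w :: (ws ++ [z])).dropLast = w :: ws := by
      rw [← List.cons_append]; exact List.dropLast_concat
    simp only [finishAltB, List.cons_append, hg, hd]

theorem paren_shape (b : List Char) (h1 : PySem.Chars.startswith b ['('] = true)
    (h2 : PySem.Chars.endswith b [')'] = true) : ∃ m, b = '(' :: m ++ [')'] := by
  obtain ⟨y, hy⟩ := (PySem.Chars.endswith_iff _ _).mp h2
  cases y with
  | nil =>
    rw [List.nil_append] at hy
    subst hy
    exact absurd h1 (by decide)
  | cons c y' =>
    have hpre := (PySem.Chars.startswith_iff _ _).mp h1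
    rw [← hy] at hpre
    have hc : c = '(' := by
      obtain ⟨t, ht⟩ := hpre
      exact ((List.cons_eq_cons.mp ht).1).symm
    exact ⟨y', by rw [← hy, hc]⟩

theorem slice_one_neg_one (x y : Char) (m : List Char) :
    PySem.List.slice (x :: m ++ [y]) (some 1) (some (-1)) = m := by
  unfold PySem.List.slice PySem.List.clampIdx
  norm_num
  rw [if_neg (show ¬((m.length : Int) + 1 < 0) by omega)]
  rw [show m.length + 1 - 1 = m.length from rfl]
  exact List.take_left

theorem getLastD_snocLast (v : List Char) (L : List (List Char)) (d : List Char)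
    (hL : L ≠ []) : (snocLast v L).getLastD d = L.getLastD d ++ v := by
  induction L generalizing d with
  | nil => exact absurd rfl hL
  | cons h t ih =>
    cases t with
    | nil => simp [snocLast]
    | cons h2 t2 =>
      rw [snocLast_cons _ _ _ (by simp), List.getLastD_cons, List.getLastD_cons,
        ih h (by simp)]

theorem head_token_startswith (b : List Char) (hl : PySem.Chars.lstrip b = b) :
    PySem.Chars.startswith (PySem.Chars.strip ((splitC ',' b).headD [])) ['('] =
      PySem.Chars.startswith b ['('] := by
  cases b with
  | nil => simp [splitC, PySem.Chars.strip, PySem.Chars.lstrip, PySem.Chars.rstrip]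
  | cons c0 b2 =>
    have hc0 := lstrip_fix_head c0 b2 hl
    by_cases hc : c0 = ','
    · subst hc
      rw [splitC_cons_sep]
      simp [PySem.Chars.strip, PySem.Chars.lstrip, PySem.Chars.rstrip,
        PySem.Chars.startswith, List.isPrefixOf]
    · rw [splitC_cons_ne ',' c0 b2 hc]
      cases hs : splitC ',' b2 with
      | nil => exact absurd hs (splitC_ne_nil _ _)
      | cons h t =>
        simp only [consHead, List.headD_cons, List.singleton_append]
        rw [strip_cons_nonspace c0 h hc0]
        simp [PySem.Chars.startswith, List.isPrefixOf]

theorem last_token_endswith (b : List Char) (hr : PySem.Chars.rstrip b = b) :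
    PySem.Chars.endswith (PySem.Chars.strip ((splitC ',' b).getLastD [])) [')'] =
      PySem.Chars.endswith b [')'] := by
  rcases List.eq_nil_or_concat b with hb | ⟨x, cl, hb⟩
  · subst hb
    simp [splitC, PySem.Chars.strip, PySem.Chars.lstrip, PySem.Chars.rstrip]
  · subst hb
    simp only [List.concat_eq_append] at hr ⊢
    have hcl : PySem.Chars.isspace cl = false := by
      by_cases hp : PySem.Chars.isspace cl = true
      · exfalso
        have h1 : PySem.Chars.rstrip (x ++ [cl]) = PySem.Chars.rstrip x := by
          exact rstrip_append_ws x [cl] (by simpa using hp)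
        rw [hr] at h1
        have h2 := (rstrip_prefix x).length_le
        have h3 := congrArg List.length h1
        simp at h3
        omega
      · simpa using hp
    by_cases hc : cl = ','
    · subst hc
      rw [splitC_append_sep]
      have hL : PySem.Chars.endswith (x ++ [',']) [')'] = false := by
        rw [Bool.eq_false_iff]
        intro hT
        obtain ⟨y, hy⟩ := (PySem.Chars.endswith_iff _ _).mp hT
        have := (List.append_inj' hy.symm rfl).2
        simp at this
      rw [List.getLastD_concat, hL]
      decide
    · rw [splitC_append_right ',' x [cl] (by simpa using fun h => hc h.symm),
        getLastD_snocLast _ _ _ (splitC_ne_nil _ _)]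
      rw [strip_append_singleton_nonspace _ cl hcl]
      simp [PySem.Chars.endswith, List.isSuffixOf, List.reverse_append, List.isPrefixOf]

theorem finishAltB_single (t : List Char) :
    finishAltB [t] =
      if PySem.Chars.startswith t ['('] && PySem.Chars.endswith t [')'] then
        (if (PySem.Chars.strip (PySem.List.slice t (some 1) (some (-1)))).isEmpty then []
         else [String.ofList (PySem.Chars.strip (PySem.List.slice t (some 1) (some (-1))))])
      else [String.ofList t] := rfl

-- the per-alternative equivalence on a stripped alternative
theorem key_b (b : List Char) (hl : PySem.Chars.lstrip b = b) (hr : PySem.Chars.rstrip b = b) :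
    fApy b = finishAltB ((splitC ',' b).map PySem.Chars.strip) := by
  have hsb : PySem.Chars.strip b = b := by
    unfold PySem.Chars.strip; rw [hl, hr]
  by_cases hc : ',' ∈ b
  · -- multi-token alternative
    obtain ⟨t0, t1, rest, hsp⟩ := splitC_mem ',' b hc
    have hne : t1 :: rest ≠ [] := by simp
    obtain ⟨zs, z, hz⟩ : ∃ zs z, t1 :: rest = zs ++ [z] :=
      ⟨(t1 :: rest).dropLast, (t1 :: rest).getLast hne,
        (List.dropLast_concat_getLast hne).symm⟩
    have hsp2 : splitC ',' b = t0 :: zs ++ [z] := by rw [hsp, hz]; simp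
    have htoks : (splitC ',' b).map PySem.Chars.strip =
        PySem.Chars.strip t0 :: zs.map PySem.Chars.strip ++ [PySem.Chars.strip z] := by
      rw [hsp2]; simp
    -- the two paren conditions agree
    have hhead : PySem.Chars.startswith (PySem.Chars.strip t0) ['('] =
        PySem.Chars.startswith b ['('] := by
      have := head_token_startswith b hl
      rw [hsp2] at this
      simpa using this
    have hlast : PySem.Chars.endswith (PySem.Chars.strip z) [')'] =
        PySem.Chars.endswith b [')'] := by
      have := last_token_endswith b hr
      rw [hsp2] at this
      rw [show t0 :: zs ++ [z] = (t0 :: zs) ++ [z] from rfl, List.getLastD_concat] at this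
      exact this
    rw [htoks, finishAltB_multi, hhead, hlast]
    by_cases hA : (PySem.Chars.startswith b ['('] && PySem.Chars.endswith b [')']) = true
    · -- parenthesised: peel '(' and ')'
      obtain ⟨hA1, hA2⟩ := Bool.and_eq_true_iff.mp hA
      obtain ⟨m, hm⟩ := paren_shape b hA1 hA2
      have hcm : ',' ∈ m := by
        rw [hm] at hc
        rcases List.mem_cons.mp hc with h | h
        · exact absurd h.symm (by decide)
        · rcases List.mem_append.mp h with h | h
          · exact h
          · simp at h
      -- chunks of b from chunks of m
      obtain ⟨h0, s1, srest, hsm⟩ := splitC_mem ',' m hcm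
      have hnem : s1 :: srest ≠ [] := by simp
      obtain ⟨rr, lm, hrl⟩ : ∃ rr lm, s1 :: srest = rr ++ [lm] :=
        ⟨(s1 :: srest).dropLast, (s1 :: srest).getLast hnem,
          (List.dropLast_concat_getLast hnem).symm⟩
      have hsm2 : splitC ',' m = (h0 :: rr) ++ [lm] := by rw [hsm, hrl]; rfl
      have hbchunks : splitC ',' b = ('(' :: h0) :: rr ++ [lm ++ [')']] := by
        rw [hm, List.cons_append, splitC_cons_ne ',' '(' _ (by decide),
          splitC_append_right ',' m [')'] (by decide), hsm2, snocLast_append_last]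
        simp [consHead, List.cons_append]
      -- identify t0, zs, z
      have hid : t0 = '(' :: h0 ∧ zs = rr ∧ z = lm ++ [')'] := by
        rw [hsp2] at hbchunks
        have h1 := List.cons_eq_cons.mp hbchunks
        obtain ⟨he1, he2⟩ := h1
        have h2 := List.append_inj' he2 rfl
        exact ⟨he1, h2.1, by simpa using h2.2⟩
      obtain ⟨hid1, hid2, hid3⟩ := hid
      -- B side: the scanner's paren branch fires
      rw [if_pos hA]
      -- A side
      unfold fApy
      rw [if_pos hA, hm, slice_one_neg_one]
      unfold filterSplitA
      rw [splitOn_eq_splitC, hsm2]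
      rw [hid1, hid2, hid3]
      rw [strip_cons_nonspace '(' h0 (by decide)]
      rw [show List.drop 1 ('(' :: PySem.Chars.rstrip h0) = PySem.Chars.rstrip h0 from rfl]
      rw [strip_rstrip]
      rw [strip_append_singleton_nonspace lm ')' (by decide)]
      rw [List.dropLast_concat]
      rw [strip_lstrip]
      simp
    · have hAf : (PySem.Chars.startswith b ['('] && PySem.Chars.endswith b [')']) = false :=
        Bool.not_eq_true _ ▸ (by simpa using hA)
      rw [hAf, if_neg (by simp)]
      unfold fApy
      rw [if_neg (by rw [hAf]; simp)]
      have hin : PySem.Chars.isIn [','] b = true := by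
        have := (PySem.Chars.isIn_eq_false_iff [','] b)
        cases hx : PySem.Chars.isIn [','] b
        · exact absurd ((List.singleton_infix_iff _ _).mpr hc) (this.mp hx)
        · rfl
      rw [if_pos hin]
      unfold filterSplitA
      rw [splitOn_eq_splitC, htoks]
  · -- single-token alternative
    rw [splitC_nosep ',' b hc]
    simp only [List.map_cons, List.map_nil, hsb]
    rw [finishAltB_single]
    unfold fApy
    by_cases hA : (PySem.Chars.startswith b ['('] && PySem.Chars.endswith b [')']) = true
    · rw [if_pos hA, if_pos hA]
      obtain ⟨hA1, hA2⟩ := Bool.and_eq_true_iff.mp hA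
      obtain ⟨m, hm⟩ := paren_shape b hA1 hA2
      have hcm : ',' ∉ m := by
        intro h
        exact hc (by rw [hm]; exact List.mem_cons_of_mem _ (List.mem_append_left _ h))
      rw [hm, slice_one_neg_one]
      unfold filterSplitA
      rw [splitOn_eq_splitC, splitC_nosep ',' m hcm]
      simp only [List.map_cons, List.map_nil]
      by_cases he : (PySem.Chars.strip m).isEmpty = true
      · rw [if_pos he]
        simp [List.isEmpty_iff.mp he, List.filter]
      · rw [if_neg he]
        have : (!(PySem.Chars.strip m).isEmpty) = true := by simp_all
        simp [List.filter, this]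
    · rw [if_neg hA, if_neg hA]
      have hin : PySem.Chars.isIn [','] b = false := by
        rw [PySem.Chars.isIn_eq_false_iff]
        intro hinf
        exact hc ((List.singleton_infix_iff _ _).mp hinf)
      rw [if_neg (by rw [hin]; simp)]

theorem key_alt (a : List Char) :
    fApy (PySem.Chars.strip a) = finishAltB ((splitC ',' a).map PySem.Chars.strip) := by
  rw [← tokens_strip]
  have h := strip_idem a
  exact key_b _ (stripped_lstrip _ h) (stripped_rstrip _ h)

-- ===== VERDICT (by name: the statement is the Claim_ definition above) =====
theorem parse_branch_py_spec : Claim_equal_parse_branch_py := by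
  intro expr _
  unfold Spec_parse_branch_py
  rw [A_eq_map, B_eq_map]
  exact List.map_congr_left (fun a _ => key_alt a)
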